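-- pv_equiv track=rewrite | github.com/manicakes/ProGearSDK | tools/srom_utils.py | bitmap_to_pixels
-- ===== SOURCE A (Python) =====
-- def bitmap_to_pixels(bitmap_8x8):
--     """
--     Convert 1bpp bitmap to 8x8 pixel array.
--
--     Args:
--         bitmap_8x8: List of 8 bytes, one per row.
--                     MSB is leftmost pixel (column 0).
--                     Bit value 1 becomes pixel value 1.
--
--     Returns:
--         list: 2D array [row][col] of pixel values (0 or 1)
--     """
--     pixels = []
--     for row_byte in bitmap_8x8:
--         row = []
--         for col in range(8):
--             # MSB (bit 7) is column 0, so shift accordingly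
--             pixel = 1 if (row_byte & (0x80 >> col)) else 0
--             row.append(pixel)
--         pixels.append(row)
--     return pixels
-- ===== SOURCE B (Python) =====
-- def bitmap_to_pixels(bitmap_8x8):
--     """Convert 1bpp bitmap to 8x8 pixel array (string-formatting based)."""
--     return [[1 if c == '1' else 0 for c in format(row_byte & 0xFF, '08b')]
--             for row_byte in bitmap_8x8]
-- ===== Notes on version B (the rewrite author's own statement) =====
-- stated objective: simpler
-- what changed: Replaces A's explicit accumulator loops and per-column shift/mask arithmetic with a single comprehension that formats each byte as an 8-char binary string (format(b & 0xFF, '08b')) and maps its characters to 0/1.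
import Mathlib
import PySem

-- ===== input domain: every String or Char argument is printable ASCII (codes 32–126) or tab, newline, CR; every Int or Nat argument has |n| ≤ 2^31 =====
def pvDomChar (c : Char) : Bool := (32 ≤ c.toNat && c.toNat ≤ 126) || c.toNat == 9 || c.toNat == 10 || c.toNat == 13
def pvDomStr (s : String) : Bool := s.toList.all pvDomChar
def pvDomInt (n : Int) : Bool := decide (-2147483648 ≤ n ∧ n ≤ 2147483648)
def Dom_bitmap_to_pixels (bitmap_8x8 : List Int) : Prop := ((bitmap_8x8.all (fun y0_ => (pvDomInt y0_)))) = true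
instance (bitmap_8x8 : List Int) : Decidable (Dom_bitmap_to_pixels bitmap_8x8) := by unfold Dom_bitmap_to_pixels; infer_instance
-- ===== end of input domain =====

-- B replaces A's inner masking loop by string-based bit extraction: format(row_byte & 0xFF, '08b')
-- mapped char-by-char to 0/1 (objective: simpler — one comprehension, no shift/mask arithmetic).

-- ===== PORT A =====
-- literal port: outer loop appends one row per byte; inner loop over range(8) masks with 0x80 >> col.
-- col ranges over 0..7 (nonnegative), so 'col.toNat' is exact for Python's '0x80 >> col'.
def bitmap_to_pixels (bitmap_8x8 : List Int) : List (List Int) :=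
  bitmap_8x8.foldl (fun pixels row_byte =>
    pixels ++ [(PySem.List.pyRange 0 8 1).foldl (fun row col =>
      row ++ [if PySem.Int.band row_byte ((128:Int) >>> col.toNat) ≠ 0 then (1:Int) else 0]) []]) []

-- ===== PORT B =====
-- format(m, '08b') for 0 ≤ m: binary digits (PySem.Int.toBinChars) zero-padded on the left to width 8;
-- exact here because m = row_byte & 0xFF is always nonnegative.
def pvFmt08b (m : Int) : List Char :=
  let t := PySem.Int.toBinChars m
  List.replicate (8 - t.length) '0' ++ t

def bitmap_to_pixels_alt (bitmap_8x8 : List Int) : List (List Int) :=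
  bitmap_8x8.map (fun row_byte =>
    (pvFmt08b (PySem.Int.band row_byte 255)).map (fun c => if c = '1' then (1:Int) else 0))

-- ===== PRECONDITION & SPEC =====
def Spec_bitmap_to_pixels (bitmap_8x8 : List Int) (out : List (List Int)) : Prop := out = bitmap_to_pixels_alt bitmap_8x8
instance (bitmap_8x8 : List Int) (out : List (List Int)) : Decidable (Spec_bitmap_to_pixels bitmap_8x8 out) := by unfold Spec_bitmap_to_pixels; infer_instance

-- ===== CLAIM (what is proved, stated in full; the proofs are below) =====
def Claim_equal_bitmap_to_pixels : Prop := ∀ (bitmap_8x8 : List Int), Dom_bitmap_to_pixels bitmap_8x8 → Spec_bitmap_to_pixels bitmap_8x8 (bitmap_to_pixels bitmap_8x8)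

-- ===== LEMMAS AND PROOFS =====

-- A's inner loop / B's per-byte row, as named functions (definitionally equal to the ports' bodies).
def pvInnerA (b : Int) : List Int :=
  (PySem.List.pyRange 0 8 1).foldl (fun row col =>
    row ++ [if PySem.Int.band b ((128:Int) >>> col.toNat) ≠ 0 then (1:Int) else 0]) []

def pvInnerB (b : Int) : List Int :=
  (pvFmt08b (PySem.Int.band b 255)).map (fun c => if c = '1' then (1:Int) else 0)

def pvBit (b M : Int) : Int := if PySem.Int.band b M ≠ 0 then 1 else 0

lemma pvInnerA_explicit (b : Int) :
    pvInnerA b = [pvBit b 128, pvBit b 64, pvBit b 32, pvBit b 16,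
                  pvBit b 8, pvBit b 4, pvBit b 2, pvBit b 1] := rfl

lemma pvTestBit255 (i : Nat) : Nat.testBit 255 i = decide (i < 8) := by
  have h : (255:Nat) = 2^8 - 1 := by norm_num
  rw [h, Nat.testBit_two_pow_sub_one]

-- low 8 bits only: masking with 255 first does not change an AND with 2^p, p < 8
lemma pvH1 (n p : Nat) (hp : p < 8) : (n &&& 255) &&& 2^p = n &&& 2^p := by
  apply Nat.eq_of_testBit_eq; intro i
  by_cases hpi : p = i
  · subst hpi
    simp [Nat.testBit_and, pvTestBit255, hp]
  · simp [Nat.testBit_and, hpi]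

lemma pvE1 (c p : Nat) (hp : p < 8) : 2^p &&& c = 2^p &&& (c &&& 255) := by
  apply Nat.eq_of_testBit_eq; intro i
  by_cases hpi : p = i
  · subst hpi
    simp [Nat.testBit_and, pvTestBit255, hp]
  · simp [Nat.testBit_and, hpi]

lemma pvE2 (c : Nat) : 255 &&& c = 255 &&& (c &&& 255) := by
  apply Nat.eq_of_testBit_eq; intro i
  by_cases hi : i < 8 <;> simp [Nat.testBit_and, pvTestBit255, hi]

set_option maxRecDepth 10000 in
lemma pvH2Fin : ∀ (d : Fin 256) (p : Fin 8),
    2^(p:Nat) - (2^(p:Nat) &&& (d:Nat)) = (255 - (255 &&& (d:Nat))) &&& 2^(p:Nat) := by decide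

lemma pvH2 (c p : Nat) (hp : p < 8) :
    2^p - (2^p &&& c) = (255 - (255 &&& c)) &&& 2^p := by
  rw [pvE1 c p hp, pvE2 c]
  have hd : c &&& 255 < 256 := by
    have := Nat.and_le_right (n := c) (m := 255); omega
  exact pvH2Fin ⟨c &&& 255, hd⟩ ⟨p, hp⟩

lemma pvPowCast (p : Nat) : ((2:Int)^p) = ((2^p : Nat) : Int) := by push_cast; ring

lemma pvPowToNat (p : Nat) : ((2:Int)^p).toNat = 2^p := by
  rw [pvPowCast]; exact Int.toNat_natCast _

-- an AND with a low power of two sees only the low byte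
lemma pvL (b : Int) (p : Nat) (hp : p < 8) :
    PySem.Int.band b (2^p) = PySem.Int.band (PySem.Int.band b 255) (2^p) := by
  by_cases hb : 0 ≤ b
  · rw [PySem.Int.band_of_nonneg hb (by positivity), PySem.Int.band_of_nonneg hb (by norm_num),
        PySem.Int.band_of_nonneg (by positivity) (by positivity), pvPowToNat,
        Int.toNat_natCast, (show Int.toNat 255 = 255 from rfl), pvH1 b.toNat p hp]
  · have e255 : (255:Int).toNat = 255 := rfl
    have h255 : PySem.Int.band b 255 = ((255 - (255 &&& (-b - 1).toNat) : Nat) : Int) := by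
      unfold PySem.Int.band
      rw [if_neg hb, if_pos (by norm_num : (0:Int) ≤ 255), e255]
    have hpw : PySem.Int.band b ((2:Int)^p) = ((2^p - (2^p &&& (-b - 1).toNat) : Nat) : Int) := by
      unfold PySem.Int.band
      rw [if_neg hb, if_pos (by positivity : (0:Int) ≤ (2:Int)^p), pvPowToNat]
    rw [hpw, h255, PySem.Int.band_of_nonneg (by positivity) (by positivity),
        Int.toNat_natCast, pvPowToNat]
    exact congrArg _ (pvH2 (-b - 1).toNat p hp)

lemma pvBand255 (b : Int) : ∃ d : Nat, d < 256 ∧ PySem.Int.band b 255 = (d : Int) := by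
  by_cases hb : 0 ≤ b
  · refine ⟨b.toNat &&& 255, ?_, ?_⟩
    · have := Nat.and_le_right (n := b.toNat) (m := 255); omega
    · rw [PySem.Int.band_of_nonneg hb (by norm_num)]; rfl
  · refine ⟨255 - (255 &&& (-b - 1).toNat), by omega, ?_⟩
    simp [PySem.Int.band, hb]

set_option maxHeartbeats 2000000 in
set_option maxRecDepth 10000 in
lemma pvRowFin : ∀ n : Fin 256,
    pvInnerA ((n : Nat) : Int) =
      (pvFmt08b ((n : Nat) : Int)).map (fun c => if c = '1' then (1:Int) else 0) := by decide

lemma pvInner_eq (b : Int) : pvInnerA b = pvInnerB b := by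
  obtain ⟨d, hd, hEq⟩ := pvBand255 b
  have key : ∀ p : Nat, p < 8 → pvBit b (2^p) = pvBit ((d : Nat) : Int) (2^p) := by
    intro p hp; unfold pvBit; rw [pvL b p hp, hEq]
  have k128 := key 7 (by omega); have k64 := key 6 (by omega)
  have k32 := key 5 (by omega); have k16 := key 4 (by omega)
  have k8 := key 3 (by omega); have k4 := key 2 (by omega)
  have k2 := key 1 (by omega); have k1 := key 0 (by omega)
  norm_num at k128 k64 k32 k16 k8 k4 k2 k1
  have hAd : pvInnerA b = pvInnerA ((d : Nat) : Int) := by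
    rw [pvInnerA_explicit, pvInnerA_explicit, k128, k64, k32, k16, k8, k4, k2, k1]
  rw [hAd, pvRowFin ⟨d, hd⟩]
  unfold pvInnerB
  rw [hEq]

lemma pvFoldlPush (g : Int → List Int) :
    ∀ (l : List Int) (acc : List (List Int)),
      l.foldl (fun a x => a ++ [g x]) acc = acc ++ l.map g := by
  intro l
  induction l with
  | nil => intro acc; simp
  | cons x t ih => intro acc; simp [List.foldl, ih]

-- ===== VERDICT (by name: the statement is the Claim_ definition above) =====
theorem bitmap_to_pixels_spec : Claim_equal_bitmap_to_pixels := by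
  intro l _
  unfold Spec_bitmap_to_pixels
  have hA : bitmap_to_pixels l = l.foldl (fun a x => a ++ [pvInnerA x]) [] := rfl
  have hB : bitmap_to_pixels_alt l = l.map pvInnerB := rfl
  rw [hA, hB, pvFoldlPush pvInnerA l []]
  simp [show pvInnerA = pvInnerB from funext pvInner_eq]
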